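-- pv_equiv track=rewrite | github.com/RyuAsuka/python-utils | mycalendar.py | build_calendar
-- ===== SOURCE A (Python) =====
-- def str_week(year, month, day):
--     """
--     Calculate a specific day is what day of a week.
--     :param year: The year
--     :param month: The month
--     :param day: The day
--     :return: The weekday of this date.
--     """
--     if month == 1 or month == 2:
--         month += 12
--         year -= 1
--     a = ((day + 2 * month + 3 * (month + 1) // 5 + year + year // 4 - year // 100 + year // 400) + 1) % 7
--     return a
--
-- def is_leap_year(year):
--     """
--     Judge if one year is leap year.
--     :param year: The year.
--     :return: True if the year is a leap year, else False
--     """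
--     if year % 4 == 0 and year % 100 != 0:
--         return True
--     if year % 400 == 0:
--         return True
--     return False
--
-- def build_calendar(year, month):
--     """
--     Build the calendar of specific year and month.
--     :param year: The year.
--     :param month: The month.
--     :return: The list of the calendar.
--     """
--     calendar = []
--     title = [' SU', ' MO', ' TU', ' WE', ' TH', ' FR', ' SA']
--     if month == 2 and is_leap_year(year):
--         days = 29
--     elif month == 2 and not is_leap_year(year):
--         days = 28
--     elif month in [1, 3, 5, 7, 8, 10, 12]:
--         days = 31
--     elif month in [4, 6, 9, 11]:
--         days = 30
--     calendar.append(title)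
--     week = ['   ', '   ', '   ', '   ', '   ', '   ', '   ']
--     for d in range(1, days+1):
--         if str_week(year, month, d) == 0:
--             if d != 1:
--                 calendar.append(week)
--                 week = ['   ', '   ', '   ', '   ', '   ', '   ', '   ']
--         if 1 <= d < 10:
--             week[str_week(year, month, d)] = '  %d' % d
--         else:
--             week[str_week(year, month, d)] = ' %d' % d
--         if d == days:
--             n = str_week(year, month, d)
--             week = week[:n+1]
--             calendar.append(week)
--     return calendar
-- ===== SOURCE B (Python) =====
-- def str_week(year, month, day):
--     if month == 1 or month == 2:
--         month += 12
--         year -= 1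
--     a = ((day + 2 * month + 3 * (month + 1) // 5 + year + year // 4 - year // 100 + year // 400) + 1) % 7
--     return a
--
-- def is_leap_year(year):
--     if year % 4 == 0 and year % 100 != 0:
--         return True
--     if year % 400 == 0:
--         return True
--     return False
--
-- def build_calendar(year, month):
--     if month == 2 and is_leap_year(year):
--         days = 29
--     elif month == 2:
--         days = 28
--     elif month in [1, 3, 5, 7, 8, 10, 12]:
--         days = 31
--     elif month in [4, 6, 9, 11]:
--         days = 30
--     first = str_week(year, month, 1)
--     cells = ['   '] * first + [(' %2d' % d) for d in range(1, days + 1)]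
--     calendar = [[' SU', ' MO', ' TU', ' WE', ' TH', ' FR', ' SA']]
--     for i in range(0, len(cells), 7):
--         calendar.append(cells[i:i + 7])
--     return calendar
-- ===== Notes on version B (the rewrite author's own statement) =====
-- stated objective: simpler
-- what changed: B replaces A's stateful loop that mutates a 7-slot week buffer (with Sunday flushes and a final truncation) by computing the first weekday once, building a flat list of leading blanks plus formatted day cells, and chunking it into rows of 7.
import Mathlib
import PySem

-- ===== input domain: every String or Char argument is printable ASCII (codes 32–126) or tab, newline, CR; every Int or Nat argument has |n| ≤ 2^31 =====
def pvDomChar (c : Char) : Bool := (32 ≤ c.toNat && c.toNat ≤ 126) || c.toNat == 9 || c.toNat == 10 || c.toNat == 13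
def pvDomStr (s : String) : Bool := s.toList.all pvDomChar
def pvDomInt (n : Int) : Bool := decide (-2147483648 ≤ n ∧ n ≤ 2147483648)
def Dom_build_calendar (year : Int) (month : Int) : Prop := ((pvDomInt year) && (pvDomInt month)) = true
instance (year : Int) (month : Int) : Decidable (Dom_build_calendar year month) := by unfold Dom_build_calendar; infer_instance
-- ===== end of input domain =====

-- B rebuilds the month as a flat cell list chunked into weeks instead of A's mutable-week loop (objective: simpler decomposition, same cost).

-- ===== PORT A =====
-- shared module helper str_week (Python '//' and '%': floor semantics via PySem)
def str_week (year : Int) (month : Int) (day : Int) : Int :=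
  let p : Int × Int := if month = 1 ∨ month = 2 then (year - 1, month + 12) else (year, month)
  PySem.Int.mod
    ((day + 2 * p.2 + PySem.Int.floordiv (3 * (p.2 + 1)) 5 + p.1 + PySem.Int.floordiv p.1 4
        - PySem.Int.floordiv p.1 100 + PySem.Int.floordiv p.1 400) + 1) 7

-- shared module helper is_leap_year
def is_leap_year (year : Int) : Bool :=
  if PySem.Int.mod year 4 = 0 ∧ PySem.Int.mod year 100 ≠ 0 then true
  else if PySem.Int.mod year 400 = 0 then true
  else false

-- the days-in-month if/elif chain, identical in A and B (hoisted as a helper);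
-- the final 'else 0' is never reached under Pre_ (Python: NameError, days unbound)
def days_in_month (year : Int) (month : Int) : Int :=
  if month = 2 ∧ is_leap_year year = true then 29
  else if month = 2 ∧ ¬ is_leap_year year = true then 28
  else if month = 1 ∨ month = 3 ∨ month = 5 ∨ month = 7 ∨ month = 8 ∨ month = 10 ∨ month = 12 then 31
  else if month = 4 ∨ month = 6 ∨ month = 9 ∨ month = 11 then 30
  else 0

def pvTitle : List String := [" SU", " MO", " TU", " WE", " TH", " FR", " SA"]

def pvBlankWeek : List String := ["   ", "   ", "   ", "   ", "   ", "   ", "   "]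

-- A's for-loop over d in range(1, days+1) with state (calendar, week);
-- week[i] = v is PySem.List.pySetD (the index str_week … is mod 7, always in range);
-- week[:n+1] is PySem.List.slice
def build_calendar_loop (w : Int → Int) (days : Int) : List (List String) :=
  ((PySem.List.pyRange 1 (days + 1) 1).foldl
    (fun st d =>
      let calendar := st.1
      let week := st.2
      let st1 : List (List String) × List String :=
        if w d = 0 ∧ d ≠ 1 then (calendar ++ [week], pvBlankWeek) else (calendar, week)
      let week2 := PySem.List.pySetD st1.2 (w d)
        (if 1 ≤ d ∧ d < 10 then "  " ++ PySem.Int.toStr d else " " ++ PySem.Int.toStr d)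
      if d = days then
        let week3 := PySem.List.slice week2 none (some (w d + 1))
        (st1.1 ++ [week3], week3)
      else (st1.1, week2))
    ([pvTitle], pvBlankWeek)).1

def build_calendar (year : Int) (month : Int) : List (List String) :=
  build_calendar_loop (str_week year month) (days_in_month year month)

-- ===== PORT B =====
-- B: cells = ['   ']*first + formatted days; calendar = [title] + chunks of 7
-- ' %2d' % d ported for 1 ≤ d ≤ 31 (the only d reached): a space, then width-2 right-justified
def build_calendar_chunks (first : Int) (days : Int) : List (List String) :=
  let cells := PySem.List.pyRepeat ["   "] first ++
    (PySem.List.pyRange 1 (days + 1) 1).map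
      (fun d => " " ++ (if d < 10 then " " else "") ++ PySem.Int.toStr d)
  [pvTitle] ++ (PySem.List.pyRange 0 (cells.length : Int) 7).map
    (fun i => PySem.List.slice cells (some i) (some (i + 7)))

def build_calendar_alt (year : Int) (month : Int) : List (List String) :=
  build_calendar_chunks (str_week year month 1) (days_in_month year month)

-- ===== PRECONDITION & SPEC =====
-- Pre_: months outside 1..12 make Python's A raise NameError ('days' never assigned)
def Pre_build_calendar (year : Int) (month : Int) : Prop := 1 ≤ month ∧ month ≤ 12
instance (year : Int) (month : Int) : Decidable (Pre_build_calendar year month) := by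
  unfold Pre_build_calendar; infer_instance

def pvWitness_build_calendar : Int × Int := (2024, 2)

def Spec_build_calendar (year : Int) (month : Int) (out : List (List String)) : Prop := out = build_calendar_alt year month
instance (year : Int) (month : Int) (out : List (List String)) : Decidable (Spec_build_calendar year month out) := by unfold Spec_build_calendar; infer_instance

-- ===== CLAIM (what is proved, stated in full; the proofs are below) =====
def Claim_equal_build_calendar : Prop := ∀ (year : Int) (month : Int), Dom_build_calendar year month → Pre_build_calendar year month → Spec_build_calendar year month (build_calendar year month)

-- ===== LEMMAS AND PROOFS =====

-- str_week is (str_week at day 1) shifted by d - 1, mod 7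
lemma str_week_shift (year month : Int) (d : Int) :
    str_week year month d = (str_week year month 1 + d - 1) % 7 := by
  unfold str_week
  rw [PySem.Int.mod_eq_emod_of_pos (by norm_num), PySem.Int.mod_eq_emod_of_pos (by norm_num)]
  split <;> omega

lemma str_week_bounds (year month d : Int) :
    0 ≤ str_week year month d ∧ str_week year month d < 7 := by
  unfold str_week
  exact ⟨PySem.Int.mod_nonneg _ (by norm_num), PySem.Int.mod_lt _ (by norm_num)⟩

lemma days_in_month_bounds (year month : Int) (h1 : 1 ≤ month) (h2 : month ≤ 12) :
    28 ≤ days_in_month year month ∧ days_in_month year month ≤ 31 := by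
  unfold days_in_month
  split_ifs with c1 c2 c3 c4
  · omega
  · omega
  · omega
  · omega
  · have hm : month = 2 := by omega
    subst hm; tauto

-- the two decompositions agree for every admissible day count and first-weekday offset
lemma core_eq : ∀ dn : Nat, dn < 32 → 28 ≤ dn → ∀ r : Nat, r < 7 →
    build_calendar_loop (fun d => ((r : Int) + d - 1) % 7) (dn : Int)
      = build_calendar_chunks (r : Int) (dn : Int) := by
  decide

-- ===== VERDICT (by name: the statement is the Claim_ definition above) =====
theorem build_calendar_spec : Claim_equal_build_calendar := by
  intro year month _ hpre
  unfold Spec_build_calendar build_calendar build_calendar_alt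
  have hw : str_week year month = fun d => (str_week year month 1 + d - 1) % 7 :=
    funext (str_week_shift year month)
  have hr := str_week_bounds year month 1
  have hd := days_in_month_bounds year month hpre.1 hpre.2
  have e1 : days_in_month year month = (((days_in_month year month).toNat : Nat) : Int) :=
    (Int.toNat_of_nonneg (by omega)).symm
  have e2 : str_week year month 1 = (((str_week year month 1).toNat : Nat) : Int) :=
    (Int.toNat_of_nonneg hr.1).symm
  rw [e1]
  conv_lhs => rw [hw]
  rw [e2]
  refine core_eq (days_in_month year month).toNat ?_ ?_ (str_week year month 1).toNat ?_ <;> omega
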